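-- pv_equiv track=rewrite | github.com/kennedyshead/prove | benchmarks/brainfuck/python/brainfuck.py | parse
-- ===== SOURCE A (Python) =====
-- class Op:
--     INC = 0
--     DEC = 1
--     RIGHT = 2
--     LEFT = 3
--     PRINT = 4
--     LOOP_START = 5
--     LOOP_END = 6
--
-- def parse(source):
--     ops = []
--     stack = []
--     for ch in source:
--         if ch == "+":
--             ops.append((Op.INC, 1))
--         elif ch == "-":
--             ops.append((Op.DEC, 1))
--         elif ch == ">":
--             ops.append((Op.RIGHT, 1))
--         elif ch == "<":
--             ops.append((Op.LEFT, 1))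
--         elif ch == ".":
--             ops.append((Op.PRINT, 0))
--         elif ch == "[":
--             stack.append(len(ops))
--             ops.append((Op.LOOP_START, 0))
--         elif ch == "]":
--             open_idx = stack.pop()
--             ops.append((Op.LOOP_END, open_idx))
--             ops[open_idx] = (Op.LOOP_START, len(ops) - 1)
--     return ops
-- ===== SOURCE B (Python) =====
-- class Op:
--     INC = 0
--     DEC = 1
--     RIGHT = 2
--     LEFT = 3
--     PRINT = 4
--     LOOP_START = 5
--     LOOP_END = 6
--
-- SIMPLE = {
--     "+": (Op.INC, 1),
--     "-": (Op.DEC, 1),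
--     ">": (Op.RIGHT, 1),
--     "<": (Op.LEFT, 1),
--     ".": (Op.PRINT, 0),
-- }
--
-- def parse(source):
--     # pass 1: tokenize, brackets get placeholder links
--     ops = []
--     for ch in source:
--         if ch in SIMPLE:
--             ops.append(SIMPLE[ch])
--         elif ch == "[":
--             ops.append((Op.LOOP_START, 0))
--         elif ch == "]":
--             ops.append((Op.LOOP_END, 0))
--     # pass 2: link brackets with a stack of open indices
--     stack = []
--     for i in range(len(ops)):
--         if ops[i][0] == Op.LOOP_START:
--             stack.append(i)
--         elif ops[i][0] == Op.LOOP_END: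
--             o = stack.pop()
--             ops[o] = (Op.LOOP_START, i)
--             ops[i] = (Op.LOOP_END, o)
--     return ops
-- ===== Notes on version B (the rewrite author's own statement) =====
-- stated objective: alternative
-- what changed: A links brackets while scanning the source in one pass (patching ops[open_idx] at each ']'); B first tokenizes the whole source into ops with placeholder links, then runs a separate index-loop with a stack over ops to link matching brackets.
import Mathlib
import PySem

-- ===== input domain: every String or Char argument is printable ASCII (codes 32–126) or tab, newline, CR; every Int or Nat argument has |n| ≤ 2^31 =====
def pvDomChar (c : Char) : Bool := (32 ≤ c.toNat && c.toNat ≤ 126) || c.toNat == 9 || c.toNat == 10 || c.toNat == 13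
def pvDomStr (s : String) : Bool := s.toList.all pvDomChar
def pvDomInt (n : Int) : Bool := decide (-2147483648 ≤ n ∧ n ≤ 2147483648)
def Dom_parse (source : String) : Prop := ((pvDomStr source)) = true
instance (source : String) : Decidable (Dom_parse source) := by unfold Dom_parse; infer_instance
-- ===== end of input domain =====

-- ===== PORT A =====
-- B restructures A's single linking pass into tokenize-then-link (two passes); same result, same cost class (objective: alternative decomposition).
-- state: none = IndexError (stack.pop() on empty); some (ops, stack) otherwise
def stepA (s : Option (List (Int × Int) × List Nat)) (ch : Char) :
    Option (List (Int × Int) × List Nat) :=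
  match s with
  | none => none
  | some (ops, stack) =>
    if ch = '+' then some (ops ++ [(0, 1)], stack)
    else if ch = '-' then some (ops ++ [(1, 1)], stack)
    else if ch = '>' then some (ops ++ [(2, 1)], stack)
    else if ch = '<' then some (ops ++ [(3, 1)], stack)
    else if ch = '.' then some (ops ++ [(4, 0)], stack)
    else if ch = '[' then some (ops ++ [(5, 0)], ops.length :: stack)
    else if ch = ']' then
      match stack with
      | [] => none  -- stack.pop() raises IndexError
      | o :: rest =>
        -- ops.append((LOOP_END, open_idx)); ops[open_idx] = (LOOP_START, len(ops) - 1)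
        let ops' := ops ++ [(6, (o : Int))]
        some (ops'.set o (5, (ops'.length : Int) - 1), rest)
    else some (ops, stack)

def parse (source : String) : List (Int × Int) :=
  ((source.toList.foldl stepA (some ([], []))).map Prod.fst).getD []

-- ===== PORT B =====
-- SIMPLE = {"+": (0,1), ...} : the dict of the five non-bracket commands
def simpleB : List (Char × (Int × Int)) :=
  [('+', (0, 1)), ('-', (1, 1)), ('>', (2, 1)), ('<', (3, 1)), ('.', (4, 0))]

-- pass 1: tokenize, brackets get placeholder links
def tokB (ops : List (Int × Int)) (ch : Char) : List (Int × Int) :=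
  match simpleB.lookup ch with
  | some op => ops ++ [op]
  | none =>
    if ch = '[' then ops ++ [(5, 0)]
    else if ch = ']' then ops ++ [(6, 0)]
    else ops

-- pass 2, one iteration of the index loop; none = IndexError from stack.pop()
def stepB (s : Option (List (Int × Int) × List Nat)) (i : Nat) :
    Option (List (Int × Int) × List Nat) :=
  match s with
  | none => none
  | some (ops, stack) =>
    if (ops.getD i (0, 0)).1 = 5 then some (ops, i :: stack)
    else if (ops.getD i (0, 0)).1 = 6 then
      match stack with
      | [] => none  -- stack.pop() raises IndexError
      | o :: rest => some ((ops.set o (5, (i : Int))).set i (6, (o : Int)), rest)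
    else some (ops, stack)

def linkB (ops1 : List (Int × Int)) : Option (List (Int × Int) × List Nat) :=
  (List.range ops1.length).foldl stepB (some (ops1, []))

def parse_alt (source : String) : List (Int × Int) :=
  ((linkB (source.toList.foldl tokB [])).map Prod.fst).getD []

-- ===== PRECONDITION & SPEC =====
-- Pre_ excludes sources with an unmatched ']' (some prefix has more ']' than '['):
-- there Python A raises IndexError from stack.pop() and returns nothing.
def Pre_parse (source : String) : Prop :=
  ∀ n, n ≤ source.toList.length →
    (source.toList.take n).count ']' ≤ (source.toList.take n).count '['
instance (source : String) : Decidable (Pre_parse source) := by unfold Pre_parse; infer_instance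
def pvWitness_parse : String := "+[-.]x[["
def Spec_parse (source : String) (out : List (Int × Int)) : Prop := out = parse_alt source
instance (source : String) (out : List (Int × Int)) : Decidable (Spec_parse source out) := by unfold Spec_parse; infer_instance

-- ===== CLAIM (what is proved, stated in full; the proofs are below) =====
def Claim_equal_parse : Prop := ∀ (source : String), Dom_parse source → Pre_parse source → Spec_parse source (parse source)

-- ===== LEMMAS AND PROOFS =====

theorem foldl_stepB_none (I : List Nat) : I.foldl stepB none = none := by
  induction I with
  | nil => rfl
  | cons i I ih => simpa [stepB] using ih

-- Frame/invariant lemma for B's linking fold: appending unprocessed entries behind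
-- the processed region commutes with the fold, and the fold keeps length and stack bounds.
theorem linkB_frame_inv (I : List Nat) :
    ∀ (ops : List (Int × Int)) (st : List Nat) (tail : List (Int × Int)),
    (∀ i ∈ I, i < ops.length) → (∀ o ∈ st, o < ops.length) →
    (I.foldl stepB (some (ops ++ tail, st)) =
      (I.foldl stepB (some (ops, st))).map (fun p => (p.1 ++ tail, p.2))) ∧
    (∀ ops' st', I.foldl stepB (some (ops, st)) = some (ops', st') →
      ops'.length = ops.length ∧ ∀ o ∈ st', o < ops.length) := by
  induction I with
  | nil =>
    intro ops st tail _ hst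
    refine ⟨rfl, ?_⟩
    intro ops' st' h
    cases h
    exact ⟨rfl, hst⟩
  | cons i I ih =>
    intro ops st tail hI hst
    have hi : i < ops.length := hI i (by simp)
    have hget : (ops ++ tail)[i]?.getD (0, 0) = ops[i]?.getD (0, 0) := by
      rw [List.getElem?_append_left hi]
    simp only [List.foldl_cons]
    by_cases h5 : (ops[i]?.getD (0, 0)).1 = 5
    · have e1 : stepB (some (ops ++ tail, st)) i = some (ops ++ tail, i :: st) := by
        simp [stepB, List.getD, hget, h5]
      have e2 : stepB (some (ops, st)) i = some (ops, i :: st) := by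
        simp [stepB, List.getD, h5]
      rw [e1, e2]
      exact ih ops (i :: st) tail (fun j hj => hI j (by simp [hj]))
        (by intro o ho; rcases List.mem_cons.mp ho with h | h
            · exact h ▸ hi
            · exact hst o h)
    · by_cases h6 : (ops[i]?.getD (0, 0)).1 = 6
      · cases st with
        | nil =>
          have e1 : stepB (some (ops ++ tail, ([] : List Nat))) i = none := by
            simp [stepB, List.getD, hget, h6]
          have e2 : stepB (some (ops, ([] : List Nat))) i = none := by
            simp [stepB, List.getD, h6]
          rw [e1, e2, foldl_stepB_none]
          exact ⟨rfl, by intro _ _ h; cases h⟩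
        | cons o rest =>
          have ho : o < ops.length := hst o (by simp)
          have hsets : ((ops ++ tail).set o (5, (i : Int))).set i (6, (o : Int)) =
              ((ops.set o (5, (i : Int))).set i (6, (o : Int))) ++ tail := by
            rw [List.set_append_left o _ ho,
              List.set_append_left i _ (by simpa using hi)]
          have e1 : stepB (some (ops ++ tail, o :: rest)) i =
              some (((ops.set o (5, (i : Int))).set i (6, (o : Int))) ++ tail, rest) := by
            simp [stepB, List.getD, hget, h5, h6, hsets]
          have e2 : stepB (some (ops, o :: rest)) i =
              some ((ops.set o (5, (i : Int))).set i (6, (o : Int)), rest) := by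
            simp [stepB, List.getD, h5, h6]
          rw [e1, e2]
          have hlen : ((ops.set o (5, (i : Int))).set i (6, (o : Int))).length = ops.length := by
            simp
          have := ih ((ops.set o (5, (i : Int))).set i (6, (o : Int))) rest tail
            (by intro j hj; rw [hlen]; exact hI j (by simp [hj]))
            (by intro p hp; rw [hlen]; exact hst p (by simp [hp]))
          refine ⟨this.1, ?_⟩
          intro ops' st' h
          have h2 := this.2 ops' st' h
          exact ⟨by rw [h2.1, hlen], by intro p hp; have := h2.2 p hp; omega⟩
      · have e1 : stepB (some (ops ++ tail, st)) i = some (ops ++ tail, st) := by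
          simp [stepB, List.getD, hget, h5, h6]
        have e2 : stepB (some (ops, st)) i = some (ops, st) := by
          simp [stepB, List.getD, h5, h6]
        rw [e1, e2]
        exact ih ops st tail (fun j hj => hI j (by simp [hj])) hst

theorem set_last (l : List (Int × Int)) (a b : Int × Int) (n : Nat) (h : n = l.length) :
    (l ++ [a]).set n b = l ++ [b] := by
  subst h
  rw [List.set_append_right _ _ (Nat.le_refl _)]
  simp

-- the linked entries produced for one ']' agree between A's in-place patch and B's two patches
theorem close_eq (opsF : List (Int × Int)) (o : Nat) (ho : o < opsF.length) :
    ((opsF ++ [((6 : Int), (0 : Int))]).set o (5, (opsF.length : Int))).set opsF.length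
        (6, (o : Int)) =
      (opsF ++ [((6 : Int), (o : Int))]).set o
        (5, ((opsF ++ [((6 : Int), (o : Int))]).length : Int) - 1) := by
  have hv : ((opsF ++ [((6 : Int), (o : Int))]).length : Int) - 1 = (opsF.length : Int) := by
    simp
  rw [hv, List.set_append_left o _ ho, List.set_append_left o _ ho,
    set_last (opsF.set o (5, (opsF.length : Int))) ((6 : Int), (0 : Int))
      ((6 : Int), (o : Int)) opsF.length (by simp)]

-- The main correspondence: A's one-pass fold over the source equals B's
-- tokenize-then-link composition, as exception-carrying states.
theorem main_corr (cs : List Char) :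
    cs.foldl stepA (some ([], [])) = linkB (cs.foldl tokB []) := by
  induction cs using List.reverseRecOn with
  | nil => rfl
  | append_singleton cs c ih =>
    rw [List.foldl_append, List.foldl_append, ih]
    set P := cs.foldl tokB [] with hP
    simp only [List.foldl_cons, List.foldl_nil]
    have hinv := (linkB_frame_inv (List.range P.length) P [] []
      (by intro j hj; simpa using List.mem_range.mp hj) (by intro o ho; cases ho)).2
    have hframe : ∀ x : Int × Int,
        linkB (P ++ [x]) = stepB (((List.range P.length).foldl stepB
          (some (P, []))).map (fun p => (p.1 ++ [x], p.2))) P.length := by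
      intro x
      have := (linkB_frame_inv (List.range P.length) P [] [x]
        (by intro j hj; simpa using List.mem_range.mp hj) (by intro o ho; cases ho)).1
      unfold linkB
      rw [show (P ++ [x]).length = P.length + 1 by simp, List.range_succ,
        List.foldl_append, this]
      simp
    have hgetlast : ∀ (opsF : List (Int × Int)) (x : Int × Int), opsF.length = P.length →
        (opsF ++ [x])[P.length]?.getD (0, 0) = x := by
      intro opsF x hlen
      rw [← hlen]
      simp
    -- the token (if any) that pass 1 of B emits for c
    by_cases hc : c = '+' ∨ c = '-' ∨ c = '>' ∨ c = '<' ∨ c = '.' ∨ c = '[' ∨ c = ']'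
    case neg =>
      simp only [not_or] at hc
      obtain ⟨h1, h2, h3, h4, h5, h6, h7⟩ := hc
      have b1 : (c == '+') = false := by simp [h1]
      have b2 : (c == '-') = false := by simp [h2]
      have b3 : (c == '>') = false := by simp [h3]
      have b4 : (c == '<') = false := by simp [h4]
      have b5 : (c == '.') = false := by simp [h5]
      have ht : tokB P c = P := by
        simp [tokB, simpleB, List.lookup, b1, b2, b3, b4, b5, h6, h7]
      rw [ht]
      cases hQ : linkB P with
      | none => simp [stepA]
      | some q => obtain ⟨opsF, stF⟩ := q
                  simp [stepA, h1, h2, h3, h4, h5, h6, h7]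
    case pos =>
      -- c is one of the seven commands: tokB appends one token x
      obtain ⟨x, hx, hstep⟩ :
          ∃ x : Int × Int, tokB P c = P ++ [x] ∧
            ∀ (opsF : List (Int × Int)) (stF : List Nat), opsF.length = P.length →
              (∀ o ∈ stF, o < P.length) →
              stepA (some (opsF, stF)) c = stepB (some (opsF ++ [x], stF)) P.length := by
        rcases hc with h | h | h | h | h | h | h <;> subst h
        · exact ⟨(0, 1), by simp [tokB, simpleB, List.lookup],
            fun opsF stF hlen _ => by simp [stepA, stepB, hgetlast opsF _ hlen]⟩
        · exact ⟨(1, 1), by simp [tokB, simpleB, List.lookup],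
            fun opsF stF hlen _ => by simp [stepA, stepB, hgetlast opsF _ hlen]⟩
        · exact ⟨(2, 1), by simp [tokB, simpleB, List.lookup],
            fun opsF stF hlen _ => by simp [stepA, stepB, hgetlast opsF _ hlen]⟩
        · exact ⟨(3, 1), by simp [tokB, simpleB, List.lookup],
            fun opsF stF hlen _ => by simp [stepA, stepB, hgetlast opsF _ hlen]⟩
        · exact ⟨(4, 0), by simp [tokB, simpleB, List.lookup],
            fun opsF stF hlen _ => by simp [stepA, stepB, hgetlast opsF _ hlen]⟩
        · exact ⟨(5, 0), by simp [tokB, simpleB, List.lookup],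
            fun opsF stF hlen _ => by
              simp [stepA, stepB, hlen]⟩
        · refine ⟨(6, 0), by simp [tokB, simpleB, List.lookup], ?_⟩
          intro opsF stF hlen hstF
          cases stF with
          | nil => simp [stepA, stepB, hgetlast opsF _ hlen]
          | cons o rest =>
            have ho : o < opsF.length := by rw [hlen]; exact hstF o (by simp)
            have := close_eq opsF o ho
            rw [hlen] at this
            simp [stepA, stepB, hgetlast opsF _ hlen, this]
      rw [hx]
      cases hQ : linkB P with
      | none =>
        have : linkB (P ++ [x]) = none := by
          rw [hframe x, show (List.range P.length).foldl stepB (some (P, [])) = none from hQ]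
          rfl
        rw [this]
        simp [stepA]
      | some q =>
        obtain ⟨opsF, stF⟩ := q
        obtain ⟨hlen, hstF⟩ := hinv opsF stF hQ
        have hsome : linkB (P ++ [x]) = stepB (some (opsF ++ [x], stF)) P.length := by
          rw [hframe x, show (List.range P.length).foldl stepB (some (P, [])) =
            some (opsF, stF) from hQ]
          rfl
        rw [hsome]
        exact hstep opsF stF hlen hstF

-- ===== VERDICT (by name: the statement is the Claim_ definition above) =====
theorem parse_spec : Claim_equal_parse := by
  intro source _ _
  unfold Spec_parse parse parse_alt
  rw [main_corr]
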